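-- pv_equiv track=rewrite | github.com/jopo666/HistoPrep | histoprep/functional/_level.py | _level_from_dimensions
-- ===== SOURCE A (Python) =====
-- def _level_from_dimensions(
--     dimensions: tuple[int, int], level_dimensions: dict[int, tuple[int, int]]
-- ) -> int:
--     """Find level which is closest to `dimensions`.
--
--     Args:
--         dimensions: Height and width to match.
--
--     Returns:
--         Level which is closest to `dimensions`.
--
--     Example:
--         >>> level_dims = {1: (256, 256), 2: (128, 128), 3: (64, 64)}
--         >>> _level_from_dimensions(dimensions=(100, 100), level_dimensions=level_dims)
--         2
--     """
--     height, width = dimensions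
--     available = []
--     distances = []
--     for level, (level_h, level_w) in level_dimensions.items():
--         available.append(level)
--         distances.append(abs(level_h - height) + abs(level_w - width))
--     return available[distances.index(min(distances))]
-- ===== SOURCE B (Python) =====
-- def _level_from_dimensions(
--     dimensions: tuple[int, int], level_dimensions: dict[int, tuple[int, int]]
-- ) -> int:
--     """Rank the levels by Manhattan distance to the target with a stable sort
--     and take the first one; stability makes the first minimal level win ties."""
--     height, width = dimensions
--     ranked = sorted(
--         level_dimensions.items(),
--         key=lambda item: abs(item[1][0] - height) + abs(item[1][1] - width),
--     )
--     return ranked[0][0]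
-- ===== Notes on version B (the rewrite author's own statement) =====
-- stated objective: alternative
-- what changed: Replaces the build-two-parallel-lists-then-min/index/lookup computation with a sort-then-take-head: stably sort the items by Manhattan distance and return the head's level, relying on sort stability for the first-minimum tie rule; it trades the linear two-pass scan for an O(n log n) sort.
import Mathlib
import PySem

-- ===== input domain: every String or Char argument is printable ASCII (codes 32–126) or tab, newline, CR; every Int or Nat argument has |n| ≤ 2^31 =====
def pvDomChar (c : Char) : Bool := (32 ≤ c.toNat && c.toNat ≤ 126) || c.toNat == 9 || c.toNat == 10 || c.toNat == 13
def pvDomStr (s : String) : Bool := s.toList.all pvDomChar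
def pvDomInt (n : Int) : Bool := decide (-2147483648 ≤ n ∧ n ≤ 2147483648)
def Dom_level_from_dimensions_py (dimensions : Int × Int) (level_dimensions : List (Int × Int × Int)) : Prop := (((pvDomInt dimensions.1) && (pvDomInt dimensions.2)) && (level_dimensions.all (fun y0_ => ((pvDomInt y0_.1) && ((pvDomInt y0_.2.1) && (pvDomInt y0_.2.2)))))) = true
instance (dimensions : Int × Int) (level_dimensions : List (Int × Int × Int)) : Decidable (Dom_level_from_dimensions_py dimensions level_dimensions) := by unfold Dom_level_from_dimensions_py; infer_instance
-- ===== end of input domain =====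

-- B replaces A's two-parallel-lists + min/index/lookup with a stable sort by distance followed by taking the head; sort stability preserves the first-minimum tie rule.


-- ===== PORT A =====
-- loop appending to `available` and `distances`, then available[distances.index(min(distances))]
def level_from_dimensions_py (dimensions : Int × Int) (level_dimensions : List (Int × Int × Int)) : Int :=
  let height := dimensions.1
  let width := dimensions.2
  let acc := level_dimensions.foldl
    (fun (s : List Int × List Int) p =>
      (s.1 ++ [p.1], s.2 ++ [|p.2.1 - height| + |p.2.2 - width|]))
    ([], [])
  match PySem.List.min? acc.2 (fun x => x) with
  | none => 0  -- ValueError on empty dict; excluded by Pre_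
  | some m =>
    match PySem.List.index? acc.2 m with
    | none => 0  -- unreachable: min is a member
    | some i => (PySem.List.pyGet? acc.1 (i : Int)).getD 0

-- ===== PORT B =====
-- the sort key: Manhattan distance of a level's dimensions to the target
def pvKey (height width : Int) (p : Int × Int × Int) : Int :=
  |p.2.1 - height| + |p.2.2 - width|

-- sorted(items, key=distance)[0][0]
def level_from_dimensions_py_alt (dimensions : Int × Int) (level_dimensions : List (Int × Int × Int)) : Int :=
  let ranked := PySem.List.sorted level_dimensions (pvKey dimensions.1 dimensions.2) false
  match ranked with
  | [] => 0  -- IndexError on the empty dict; excluded by Pre_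
  | q :: _ => q.1

-- ===== PRECONDITION & SPEC =====
-- Both A and B raise on the empty dict (ValueError / IndexError); only that input is excluded.
def Pre_level_from_dimensions_py (dimensions : Int × Int) (level_dimensions : List (Int × Int × Int)) : Prop :=
  level_dimensions ≠ []
instance (dimensions : Int × Int) (level_dimensions : List (Int × Int × Int)) : Decidable (Pre_level_from_dimensions_py dimensions level_dimensions) := by unfold Pre_level_from_dimensions_py; infer_instance
def pvWitness_level_from_dimensions_py : (Int × Int) × (List (Int × Int × Int)) :=
  ((100, 100), [(1, 256, 256), (2, 128, 128), (3, 64, 64)])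
def Spec_level_from_dimensions_py (dimensions : Int × Int) (level_dimensions : List (Int × Int × Int)) (out : Int) : Prop := out = level_from_dimensions_py_alt dimensions level_dimensions
instance (dimensions : Int × Int) (level_dimensions : List (Int × Int × Int)) (out : Int) : Decidable (Spec_level_from_dimensions_py dimensions level_dimensions out) := by unfold Spec_level_from_dimensions_py; infer_instance

-- ===== CLAIM =====
def Claim_equal_level_from_dimensions_py : Prop := ∀ (dimensions : Int × Int) (level_dimensions : List (Int × Int × Int)), Dom_level_from_dimensions_py dimensions level_dimensions → Pre_level_from_dimensions_py dimensions level_dimensions → Spec_level_from_dimensions_py dimensions level_dimensions (level_from_dimensions_py dimensions level_dimensions)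

-- ===== LEMMAS AND PROOFS =====

-- level of the first pair whose distance equals m
def pvFirstWith (m : Int) : List (Int × Int) → Int
  | [] => 0
  | z :: t => if z.2 = m then z.1 else pvFirstWith m t

-- running strict-min argmin over (level, distance) pairs (ties keep the earlier one)
def pvBestOf (b : Int × Int) : List (Int × Int) → Int × Int
  | [] => b
  | z :: t => pvBestOf (if z.2 < b.2 then z else b) t

-- running strict-min argmin over the raw triples under a key
def pvBestT (key : Int × Int × Int → Int) (b : Int × Int × Int) : List (Int × Int × Int) → Int × Int × Int
  | [] => b
  | x :: l => pvBestT key (if key x < key b then x else b) l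

theorem pvFoldA (h w : Int) : ∀ (l : List (Int × Int × Int)) (as ds : List Int),
    l.foldl (fun (s : List Int × List Int) p =>
      (s.1 ++ [p.1], s.2 ++ [|p.2.1 - h| + |p.2.2 - w|])) (as, ds)
    = (as ++ l.map (·.1), ds ++ l.map (fun p => |p.2.1 - h| + |p.2.2 - w|)) := by
  intro l
  induction l with
  | nil => simp
  | cons p t ih => intro as ds; simp [ih]

-- the head of the insertion-sort fold over a nonempty accumulator is the running strict argmin
theorem pvHeadFold (key : Int × Int × Int → Int) :
    ∀ (l : List (Int × Int × Int)) (a : Int × Int × Int) (t : List (Int × Int × Int)),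
    ∃ t', l.foldl (fun acc x => PySem.List.insertBy (fun a b => decide (key a < key b)) x acc) (a :: t)
          = pvBestT key a l :: t' := by
  intro l
  induction l with
  | nil => intro a t; exact ⟨t, rfl⟩
  | cons x l ih =>
    intro a t
    simp only [List.foldl, PySem.List.insertBy, pvBestT]
    by_cases hx : key x < key a
    · simp only [hx, decide_true, if_true]
      exact ih x (a :: t)
    · simp only [hx, decide_false, if_false]
      exact ih a _

-- pvBestT commutes with pairing each triple with its key
theorem pvBestT_pair (key : Int × Int × Int → Int) :
    ∀ (l : List (Int × Int × Int)) (b : Int × Int × Int),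
    pvBestOf (b.1, key b) (l.map (fun p => (p.1, key p))) = ((pvBestT key b l).1, key (pvBestT key b l)) := by
  intro l
  induction l with
  | nil => intro b; rfl
  | cons x l ih =>
    intro b
    simp only [List.map, pvBestOf, pvBestT]
    by_cases hx : key x < key b
    · rw [if_pos hx, if_pos hx, ih]
    · rw [if_neg hx, if_neg hx, ih]

theorem pvFoldMin_le : ∀ (l : List Int) (a : Int), l.foldl min a ≤ a := by
  intro l
  induction l with
  | nil => intro a; simp
  | cons x t ih =>
    intro a
    simp only [List.foldl]
    exact le_trans (ih (min a x)) (min_le_left a x)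

theorem pvBestOf_firstWith : ∀ (t : List (Int × Int)) (b : Int × Int),
    (pvBestOf b t).1 = pvFirstWith ((t.map Prod.snd).foldl min b.2) (b :: t) := by
  intro t
  induction t with
  | nil => intro b; simp [pvBestOf, pvFirstWith]
  | cons z t ih =>
    intro b
    set b' := if z.2 < b.2 then z else b with hb'
    have hb'2 : b'.2 = min b.2 z.2 := by
      rcases lt_or_ge z.2 b.2 with hlt | hge
      · rw [hb', if_pos hlt, min_eq_right (le_of_lt hlt)]
      · rw [hb', if_neg (not_lt.mpr hge), min_eq_left hge]
    have hM : ((z :: t).map Prod.snd).foldl min b.2 = (t.map Prod.snd).foldl min b'.2 := by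
      simp [hb'2]
    set M := ((z :: t).map Prod.snd).foldl min b.2 with hMdef
    have hMle : M ≤ min b.2 z.2 := by
      rw [hM, ← hb'2]; exact pvFoldMin_le _ _
    have hMb : M ≤ b.2 := le_trans hMle (min_le_left _ _)
    have hMz : M ≤ z.2 := le_trans hMle (min_le_right _ _)
    have hIH := ih b'
    rw [← hM] at hIH
    simp only [pvBestOf, ← hb', hIH]
    by_cases hzb : z.2 < b.2
    · have hbM : ¬ (b.2 = M) := by omega
      rw [hb', if_pos hzb]
      simp [pvFirstWith, hbM]
    · rw [hb', if_neg hzb]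
      by_cases hbM : b.2 = M
      · simp [pvFirstWith, hbM]
      · have hzM : ¬ (z.2 = M) := by omega
        simp [pvFirstWith, hbM, hzM]

theorem pvAChar : ∀ (zs : List (Int × Int)) (m : Int), m ∈ zs.map Prod.snd →
    (match PySem.List.index? (zs.map Prod.snd) m with
     | none => (0 : Int)
     | some i => (PySem.List.pyGet? (zs.map Prod.fst) (i : Int)).getD 0)
    = pvFirstWith m zs := by
  intro zs
  induction zs with
  | nil => intro m hm; simp at hm
  | cons z t ih =>
    intro m hm
    by_cases hz : z.2 = m
    · subst hz
      rw [show (z :: t).map Prod.snd = z.2 :: t.map Prod.snd from rfl,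
          PySem.List.index?_cons_self]
      simp [pvFirstWith]
    · rw [show (z :: t).map Prod.snd = z.2 :: t.map Prod.snd from rfl,
          PySem.List.index?_cons_of_ne _ hz]
      have hmt : m ∈ t.map Prod.snd := by
        simp at hm; rcases hm with h | h
        · exact absurd h.symm hz
        · simpa using h
      have hsome : (PySem.List.index? (t.map Prod.snd) m).isSome := by
        rw [PySem.List.index?_isSome_iff]; exact hmt
      obtain ⟨j, hj⟩ := Option.isSome_iff_exists.mp hsome
      rw [hj]
      simp only [Option.map_some]
      have hget : PySem.List.pyGet? ((z :: t).map Prod.fst) ((j + 1 : Nat) : Int)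
          = PySem.List.pyGet? (t.map Prod.fst) (j : Int) := by
        rw [show ((j + 1 : Nat) : Int) = (j : Int) + 1 by push_cast; ring]
        exact PySem.List.pyGet?_cons_succ _ _ _
      rw [show (z :: t).map Prod.fst = z.1 :: t.map Prod.fst from rfl] at hget ⊢
      rw [hget]
      have := ih m hmt
      rw [hj] at this
      simpa [pvFirstWith, hz] using this

-- ===== VERDICT =====
theorem level_from_dimensions_py_spec : Claim_equal_level_from_dimensions_py := by
  intro dims lds _hdom hpre
  unfold Spec_level_from_dimensions_py
  unfold level_from_dimensions_py level_from_dimensions_py_alt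
  obtain ⟨q, rest, rfl⟩ : ∃ q rest, lds = q :: rest := by
    cases lds with
    | nil => exact absurd rfl hpre
    | cons q rest => exact ⟨q, rest, rfl⟩
  set h := dims.1
  set w := dims.2
  -- B's side: head of the stable sort = running strict argmin
  have hsortfold := PySem.List.sorted_eq_foldl_insertBy (q :: rest) (pvKey h w)
  have hfold1 : (q :: rest).foldl
      (fun acc x => PySem.List.insertBy (fun a b => decide (pvKey h w a < pvKey h w b)) x acc) []
      = rest.foldl (fun acc x => PySem.List.insertBy (fun a b => decide (pvKey h w a < pvKey h w b)) x acc) [q] := rfl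
  obtain ⟨t', ht'⟩ := pvHeadFold (pvKey h w) rest q []
  have hsorted : PySem.List.sorted (q :: rest) (pvKey h w) false = pvBestT (pvKey h w) q rest :: t' := by
    rw [hsortfold, hfold1, ht']
  rw [hsorted]
  -- A's side: rewrite the fold into the two mapped lists
  simp only [pvFoldA h w, List.nil_append]
  set zs := (q :: rest).map (fun p => (p.1, pvKey h w p)) with hzs
  have hfst : (q :: rest).map (·.1) = zs.map Prod.fst := by simp [hzs]
  have hsnd : (q :: rest).map (fun p => |p.2.1 - h| + |p.2.2 - w|) = zs.map Prod.snd := by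
    simp [hzs, pvKey]
  rw [hfst, hsnd]
  have hzcons : zs = (q.1, pvKey h w q) :: rest.map (fun p => (p.1, pvKey h w p)) := by simp [hzs]
  have hmin : PySem.List.min? (zs.map Prod.snd) (fun x => x)
      = some (((rest.map (fun p => (p.1, pvKey h w p))).map Prod.snd).foldl min (pvKey h w q)) := by
    rw [hzcons]
    exact PySem.List.min?_id_cons _ _
  set m := ((rest.map (fun p => (p.1, pvKey h w p))).map Prod.snd).foldl min (pvKey h w q) with hm
  have hmem : m ∈ zs.map Prod.snd := by
    have := PySem.List.min?_mem (key := fun x => x) hmin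
    simpa using this
  rw [hmin]
  have hA := pvAChar zs m hmem
  -- the first pair with the minimal distance is the running strict argmin
  have hbw := pvBestOf_firstWith (rest.map (fun p => (p.1, pvKey h w p))) (q.1, pvKey h w q)
  rw [← hzcons] at hbw
  rw [show ((q.1, pvKey h w q) : Int × Int).2 = pvKey h w q from rfl, ← hm] at hbw
  -- and the running strict argmin over pairs is the sort-head triple's level
  have hpair := pvBestT_pair (pvKey h w) rest q
  show (match PySem.List.index? (zs.map Prod.snd) m with
     | none => (0 : Int)
     | some i => (PySem.List.pyGet? (zs.map Prod.fst) (i : Int)).getD 0)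
    = (pvBestT (pvKey h w) q rest).1
  rw [hA, ← hbw, hpair]
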